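-- pv_equiv track=rewrite | github.com/KinnearM/Advent_2025 | day9WIP.py | part_2
-- ===== SOURCE A (Python) =====
-- def square(corner_1,corner_2):
--   x_1,y_1=corner_1
--   x_2,y_2=corner_2
--   sq=(abs(x_2-x_1)+1)*(abs(y_2-y_1)+1)
--   return sq
--
-- def find_squares(data):
--   highest_sq=[]
--   items = list(data)
--   n = len(items)
--   for i in range(n):
--       for j in range(i + 1, n):
--           sq=square(items[i],items[j])
--           highest_sq.append((sq,items[i][0], items[j][0],items[i][1], items[j][1]))
--   highest_sq.sort(key=lambda x: x[0])
--   return highest_sq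
--
-- def part_2(data):
--     points = list(data)
--     n = len(points)
--
--     edges_v = []
--     edges_h = []
--
--     for i in range(n):
--         p1 = points[i]
--         p2 = points[(i + 1) % n]
--
--         if p1[0] == p2[0]:
--             y_min, y_max = min(p1[1], p2[1]), max(p1[1], p2[1])
--             edges_v.append((p1[0], y_min, y_max))
--         else:
--             x_min, x_max = min(p1[0], p2[0]), max(p1[0], p2[0])
--             edges_h.append((p1[1], x_min, x_max))
--
--     squares=find_squares(data)#reverse or pop
--     for area, rx1, rx2, ry1, ry2 in squares:
--         is_cut = False
--         for vx, vy1, vy2 in edges_v: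
--             if rx1 < vx < rx2:
--                 if max(ry1, vy1) < min(ry2, vy2):
--                     is_cut = True
--                     break
--         if is_cut: continue
--         for hy, hx1, hx2 in edges_h:
--             if ry1 < hy < ry2:
--                 if max(rx1, hx1) < min(rx2, hx2):
--                     is_cut = True
--                     break
--         if is_cut: continue
--         return area
--     return 0
-- ===== SOURCE B (Python) =====
-- def part_2(data):
--     points = list(data)
--     edges_v = []
--     edges_h = []
--     for (x1, y1), (x2, y2) in zip(points, points[1:] + points[:1]):
--         if x1 == x2:
--             edges_v.append((x1, min(y1, y2), max(y1, y2)))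
--         else:
--             edges_h.append((y1, min(x1, x2), max(x1, x2)))
--
--     def is_cut(rx1, rx2, ry1, ry2):
--         return any(rx1 < vx < rx2 and max(ry1, vy1) < min(ry2, vy2)
--                    for vx, vy1, vy2 in edges_v) \
--             or any(ry1 < hy < ry2 and max(rx1, hx1) < min(rx2, hx2)
--                    for hy, hx1, hx2 in edges_h)
--
--     best = None
--     for i, (x1, y1) in enumerate(points):
--         for (x2, y2) in points[i + 1:]:
--             area = (abs(x1 - x2) + 1) * (abs(y1 - y2) + 1)
--             if best is None or area < best:
--                 if not is_cut(x1, x2, y1, y2):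
--                     best = area
--     return 0 if best is None else best
-- ===== Notes on version B (the rewrite author's own statement) =====
-- stated objective: faster
-- what changed: B drops find_squares' build-all-candidates/sort/first-uncut pipeline and keeps a running minimum in one direct pass over point pairs, running the cut test only for pairs whose area improves the current minimum, and builds the edge lists by zipping points with their cyclic successors instead of indexing.
import Mathlib
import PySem

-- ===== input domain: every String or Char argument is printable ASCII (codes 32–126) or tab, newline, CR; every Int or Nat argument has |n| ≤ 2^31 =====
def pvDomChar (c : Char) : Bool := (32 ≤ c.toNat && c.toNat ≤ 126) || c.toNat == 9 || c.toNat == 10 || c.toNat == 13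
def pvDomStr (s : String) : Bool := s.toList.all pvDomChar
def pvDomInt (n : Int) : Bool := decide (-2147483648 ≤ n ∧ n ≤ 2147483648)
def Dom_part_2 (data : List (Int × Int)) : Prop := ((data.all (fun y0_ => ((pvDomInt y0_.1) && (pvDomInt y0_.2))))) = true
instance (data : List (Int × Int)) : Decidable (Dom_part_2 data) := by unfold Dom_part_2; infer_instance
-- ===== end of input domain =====

-- B replaces A's collect-all-pairs / sort / first-uncut pipeline by one direct pass over the
-- point pairs keeping a running minimum, testing edge cuts only on minimum-improving pairs
-- (measured faster in a timing run; same return value).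


-- ===== PORT A =====
-- square(corner_1, corner_2)
def pySquare (c1 c2 : Int × Int) : Int := (|c2.1 - c1.1| + 1) * (|c2.2 - c1.2| + 1)

-- the nested index loops of find_squares (highest_sq before the sort)
def findSquaresRaw (data : List (Int × Int)) : List (Int × Int × Int × Int × Int) :=
  let items := data
  let n : Int := PySem.List.len items
  (PySem.List.pyRange 0 n 1).foldl (fun acc i =>
    (PySem.List.pyRange (i + 1) n 1).foldl (fun acc2 j =>
      acc2 ++ [(pySquare (PySem.List.pyGetD items i (0, 0)) (PySem.List.pyGetD items j (0, 0)),
                (PySem.List.pyGetD items i (0, 0)).1, (PySem.List.pyGetD items j (0, 0)).1,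
                (PySem.List.pyGetD items i (0, 0)).2, (PySem.List.pyGetD items j (0, 0)).2)]) acc) []

-- find_squares(data): collect, then stable sort by the area component
def findSquares (data : List (Int × Int)) : List (Int × Int × Int × Int × Int) :=
  PySem.List.sorted (findSquaresRaw data) (fun x => x.1) false

-- the edge-building loop of part_2 (state = (edges_v, edges_h))
def edgesA (points : List (Int × Int)) : List (Int × Int × Int) × List (Int × Int × Int) :=
  let n : Int := PySem.List.len points
  (PySem.List.pyRange 0 n 1).foldl (fun st i =>
    let p1 := PySem.List.pyGetD points i (0, 0)
    let p2 := PySem.List.pyGetD points (PySem.Int.mod (i + 1) n) (0, 0)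
    if p1.1 = p2.1 then (st.1 ++ [(p1.1, min p1.2 p2.2, max p1.2 p2.2)], st.2)
    else (st.1, st.2 ++ [(p1.2, min p1.1 p2.1, max p1.1 p2.1)])) ([], [])

-- the final loop of part_2: first uncut entry of the sorted candidate list, else 0
def scanA (ev eh : List (Int × Int × Int)) : List (Int × Int × Int × Int × Int) → Int
  | [] => 0
  | c :: rest =>
    let isCutV := ev.any (fun e =>
      decide (c.2.1 < e.1 ∧ e.1 < c.2.2.1 ∧ max c.2.2.2.1 e.2.1 < min c.2.2.2.2 e.2.2))
    if isCutV then scanA ev eh rest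
    else
      let isCutH := eh.any (fun e =>
        decide (c.2.2.2.1 < e.1 ∧ e.1 < c.2.2.2.2 ∧ max c.2.1 e.2.1 < min c.2.2.1 e.2.2))
      if isCutH then scanA ev eh rest else c.1

def part_2 (data : List (Int × Int)) : Int :=
  let ed := edgesA data
  scanA ed.1 ed.2 (findSquares data)

-- ===== PORT B =====
-- B pairs each point with its cyclic successor via zip(points, points[1:] + points[:1])
def edgesB (points : List (Int × Int)) : List (Int × Int × Int) × List (Int × Int × Int) :=
  (points.zip (PySem.List.slice points (some 1) ++ PySem.List.slice points none (some 1))).foldl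
    (fun st pq =>
      if pq.1.1 = pq.2.1 then (st.1 ++ [(pq.1.1, min pq.1.2 pq.2.2, max pq.1.2 pq.2.2)], st.2)
      else (st.1, st.2 ++ [(pq.1.2, min pq.1.1 pq.2.1, max pq.1.1 pq.2.1)])) ([], [])
-- is_cut(rx1, rx2, ry1, ry2): any vertical cut or any horizontal cut
def isCutB (ev eh : List (Int × Int × Int)) (rx1 rx2 ry1 ry2 : Int) : Bool :=
  (ev.any fun e => decide (rx1 < e.1 ∧ e.1 < rx2 ∧ max ry1 e.2.1 < min ry2 e.2.2)) ||
  (eh.any fun e => decide (ry1 < e.1 ∧ e.1 < ry2 ∧ max rx1 e.2.1 < min rx2 e.2.2))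

-- inner loop: for (x2, y2) in points[i+1:], testing the cut only when area improves the minimum
def innerB (ev eh : List (Int × Int × Int)) (p : Int × Int)
    (l : List (Int × Int)) (best : Option Int) : Option Int :=
  l.foldl (fun b q =>
    let area := (|p.1 - q.1| + 1) * (|p.2 - q.2| + 1)
    if (match b with | none => true | some x => decide (area < x)) = true then
      (if isCutB ev eh p.1 q.1 p.2 q.2 then b else some area)
    else b) best
-- outer loop: for i, (x1, y1) in enumerate(points), with points[i+1:] as the remaining suffix
def outerB (ev eh : List (Int × Int × Int)) : List (Int × Int) → Option Int → Option Int
  | [], best => best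
  | p :: rest, best => outerB ev eh rest (innerB ev eh p rest best)

def part_2_alt (data : List (Int × Int)) : Int :=
  let ed := edgesB data
  match outerB ed.1 ed.2 data none with
  | none => 0
  | some b => b

-- ===== PRECONDITION & SPEC =====
def Spec_part_2 (data : List (Int × Int)) (out : Int) : Prop := out = part_2_alt data
instance (data : List (Int × Int)) (out : Int) : Decidable (Spec_part_2 data out) := by unfold Spec_part_2; infer_instance

-- ===== CLAIM (what is proved, stated in full; the proofs are below) =====
def Claim_equal_part_2 : Prop := ∀ (data : List (Int × Int)), Dom_part_2 data → Spec_part_2 data (part_2 data)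

-- ===== LEMMAS AND PROOFS =====

-- the candidate tuple A builds for the pair (p, q)
def tupOf (p q : Int × Int) : Int × Int × Int × Int × Int :=
  (pySquare p q, p.1, q.1, p.2, q.2)

-- all pairs (p earlier than q), in A's traversal order
def pairsTup : List (Int × Int) → List (Int × Int × Int × Int × Int)
  | [] => []
  | p :: r => r.map (tupOf p) ++ pairsTup r

-- the cut test, read off a candidate tuple
def cutC (ev eh : List (Int × Int × Int)) (c : Int × Int × Int × Int × Int) : Bool :=
  isCutB ev eh c.2.1 c.2.2.1 c.2.2.2.1 c.2.2.2.2

-- B's running-minimum update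
def addMin (b : Option Int) (a : Int) : Option Int :=
  match b with
  | none => some a
  | some x => if a < x then some a else some x

-- areas of the uncut candidates of a list
def areasOf (ev eh : List (Int × Int × Int)) (L : List (Int × Int × Int × Int × Int)) : List Int :=
  (L.filter (fun c => !cutC ev eh c)).map (·.1)

lemma pairs_list (pts : List (Int × Int)) :
    (PySem.List.pyRange 0 (PySem.List.len pts) 1).map
      (fun i => (PySem.List.pyGetD pts i ((0 : Int), (0 : Int)),
                 PySem.List.pyGetD pts (PySem.Int.mod (i + 1) (PySem.List.len pts)) ((0 : Int), (0 : Int))))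
    = pts.zip (pts.drop 1 ++ pts.take 1) := by
  apply List.ext_getElem
  · simp [PySem.List.len_eq, PySem.List.length_pyRange_one]
    omega
  intro k h1 h2
  have hk : k < pts.length := by
    simpa [PySem.List.len_eq, PySem.List.length_pyRange_one] using h1
  have hn : 0 < (PySem.List.len pts) := by simp [PySem.List.len_eq]; omega
  rw [List.getElem_map, PySem.List.getElem_pyRange_one, List.getElem_zip]
  rw [PySem.Int.mod_eq_emod_of_pos hn]
  simp only [PySem.List.len_eq, zero_add]
  by_cases hlast : k + 1 < pts.length
  · have hmod : ((k : Int) + 1) % (pts.length : Int) = ((k + 1 : Nat) : Int) := by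
      rw [Int.emod_eq_of_lt (by positivity) (by exact_mod_cast hlast)]; push_cast; ring
    rw [hmod]
    simp only [PySem.List.pyGetD_natCast]
    rw [List.getD_eq_getElem _ _ hk, List.getD_eq_getElem _ _ hlast]
    congr 1
    rw [List.getElem_append_left (by simp; omega)]
    simp
  · have hke : k + 1 = pts.length := by omega
    have hmod : ((k : Int) + 1) % (pts.length : Int) = ((0 : Nat) : Int) := by
      rw [show ((k : Int) + 1) = (pts.length : Int) from by exact_mod_cast congrArg Nat.cast hke]
      simp
    rw [hmod]
    simp only [PySem.List.pyGetD_natCast]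
    rw [List.getD_eq_getElem _ _ hk, List.getD_eq_getElem _ _ (by omega)]
    congr 1
    rw [List.getElem_append_right (by simp; omega)]
    simp
    congr 1
    omega

lemma edgesB_eq (points : List (Int × Int)) : edgesB points = edgesA points := by
  unfold edgesA edgesB
  rw [PySem.List.slice_from points (by norm_num), PySem.List.slice_to points (by norm_num)]
  rw [show ((1:Int)).toNat = 1 from rfl, ← pairs_list, List.foldl_map]

lemma flat_pairs (pts : List (Int × Int)) :
    (List.range pts.length).flatMap
      (fun k => (pts.drop (k + 1)).map (tupOf (pts.getD k (0, 0)))) = pairsTup pts := by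
  induction pts with
  | nil => simp [pairsTup]
  | cons p r ih =>
    rw [List.length_cons, List.range_succ_eq_map, List.flatMap_cons, List.flatMap_map]
    simp only [List.drop_succ_cons, List.getD_cons_succ, List.getD_cons_zero, List.drop_zero]
    rw [pairsTup, ih]
lemma findSquaresRaw_eq (data : List (Int × Int)) :
    findSquaresRaw data = pairsTup data := by
  unfold findSquaresRaw
  simp only [PySem.List.foldl_append_singleton_eq_map]
  rw [PySem.List.foldl_append_eq_flatMap, List.nil_append]
  rw [← flat_pairs data]
  rw [show PySem.List.len data = ((data.length : Nat) : Int) from by simp [PySem.List.len_eq]]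
  rw [PySem.List.pyRange_zero_natCast, List.flatMap_map]
  apply List.flatMap_congr
  intro k hk
  simp only [List.mem_range] at hk
  have h1 : ((k : Int) + 1) = (((k + 1 : Nat)) : Int) := by push_cast; ring
  rw [h1]
  have h2 : (PySem.List.pyRange ((k + 1 : Nat) : Int) ((data.length : Nat) : Int) 1).map
      (fun j => tupOf (PySem.List.pyGetD data (k : Int) (0, 0)) (PySem.List.pyGetD data j (0, 0)))
      = ((PySem.List.pyRange ((k + 1 : Nat) : Int) (PySem.List.len data) 1).map
          (fun j => PySem.List.pyGetD data j (0, 0))).map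
          (tupOf (PySem.List.pyGetD data (k : Int) (0, 0))) := by
    rw [List.map_map]; simp [PySem.List.len_eq]
  rw [show (fun j => (pySquare (PySem.List.pyGetD data (k:Int) (0,0)) (PySem.List.pyGetD data j (0,0)),
        (PySem.List.pyGetD data (k:Int) (0,0)).1, (PySem.List.pyGetD data j (0,0)).1,
        (PySem.List.pyGetD data (k:Int) (0,0)).2, (PySem.List.pyGetD data j (0,0)).2))
      = (fun j => tupOf (PySem.List.pyGetD data (k:Int) (0,0)) (PySem.List.pyGetD data j (0,0))) from rfl]
  rw [h2, PySem.List.map_pyGetD_pyRange data (0,0) (by positivity)]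
  simp [PySem.List.pyGetD_natCast]
lemma addMin_rightComm : RightCommutative addMin := by
  constructor
  intro b a a'
  rcases b with _ | x
  · simp only [addMin]; split_ifs <;> first | rfl | (congr 1; omega)
  · simp only [addMin]
    by_cases h1 : a < x <;> by_cases h2 : a' < x <;> simp only [h1, h2, if_pos, if_neg, not_false_iff] <;>
      split_ifs <;> first | rfl | (congr 1; omega)
lemma foldl_addMin_le {x : Int} (as : List Int) (h : ∀ a ∈ as, x ≤ a) :
    as.foldl addMin (some x) = some x := by
  induction as with
  | nil => rfl
  | cons a as ih =>
    have hx : x ≤ a := h a (by simp)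
    rw [List.foldl_cons, show addMin (some x) a = some x from by simp [addMin]; omega]
    exact ih (fun a ha => h a (by simp [ha]))
lemma scanA_eq (ev eh : List (Int × Int × Int)) (L : List (Int × Int × Int × Int × Int))
    (hL : L.Pairwise (fun a b => a.1 ≤ b.1)) :
    scanA ev eh L = ((areasOf ev eh L).foldl addMin none).getD 0 := by
  induction L with
  | nil => rfl
  | cons c rest ih =>
    rw [List.pairwise_cons] at hL
    by_cases hc : cutC ev eh c = true
    · have hskip : scanA ev eh (c :: rest) = scanA ev eh rest := by
        simp only [scanA, cutC, isCutB, Bool.or_eq_true] at hc ⊢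
        rcases hc with h | h
        · rw [if_pos h]
        · by_cases h1 : (ev.any fun e => decide (c.2.1 < e.1 ∧ e.1 < c.2.2.1 ∧ max c.2.2.2.1 e.2.1 < min c.2.2.2.2 e.2.2)) = true
          · rw [if_pos h1]
          · rw [if_neg h1, if_pos h]
      rw [hskip, ih hL.2]
      simp [areasOf, hc]
    · have hret : scanA ev eh (c :: rest) = c.1 := by
        simp only [cutC, isCutB, Bool.or_eq_true, not_or, Bool.not_eq_true] at hc
        simp only [scanA, hc.1, hc.2, if_neg, Bool.false_eq_true, not_false_iff]
      rw [hret]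
      have : areasOf ev eh (c :: rest) = c.1 :: areasOf ev eh rest := by
        simp [areasOf, hc]
      rw [this, List.foldl_cons, show addMin none c.1 = some c.1 from rfl]
      rw [foldl_addMin_le _ (fun a ha => ?_), Option.getD_some]
      simp only [areasOf, List.mem_map, List.mem_filter] at ha
      obtain ⟨d, ⟨hd, _⟩, rfl⟩ := ha
      exact hL.1 d hd
lemma innerB_eq (ev eh : List (Int × Int × Int)) (p : Int × Int)
    (l : List (Int × Int)) (best : Option Int) :
    innerB ev eh p l best = (areasOf ev eh (l.map (tupOf p))).foldl addMin best := by
  induction l generalizing best with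
  | nil => rfl
  | cons q r ih =>
    have harea : (|p.1 - q.1| + 1) * (|p.2 - q.2| + 1) = (tupOf p q).1 := by
      simp only [tupOf, pySquare]
      rw [abs_sub_comm p.1 q.1, abs_sub_comm p.2 q.2]
    by_cases hc : cutC ev eh (tupOf p q) = true
    · have hc' : isCutB ev eh p.1 q.1 p.2 q.2 = true := hc
      have hstep : innerB ev eh p (q :: r) best = innerB ev eh p r best := by
        cases best <;> simp [innerB, hc']
      rw [hstep, ih best]
      simp [areasOf, hc]
    · have hn : isCutB ev eh p.1 q.1 p.2 q.2 = false := by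
        simpa [cutC, tupOf] using hc
      have hstep : innerB ev eh p (q :: r) best
          = innerB ev eh p r (addMin best ((|p.1 - q.1| + 1) * (|p.2 - q.2| + 1))) := by
        cases best with
        | none => simp [innerB, hn, addMin]
        | some x =>
          by_cases hi : (|p.1 - q.1| + 1) * (|p.2 - q.2| + 1) < x <;>
            simp [innerB, hn, addMin, hi]
      rw [hstep, ih]
      simp [areasOf, hc, harea]
lemma outerB_eq (ev eh : List (Int × Int × Int)) (l : List (Int × Int)) (best : Option Int) :
    outerB ev eh l best = (areasOf ev eh (pairsTup l)).foldl addMin best := by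
  induction l generalizing best with
  | nil => rfl
  | cons p r ih =>
    rw [outerB, ih, innerB_eq]
    simp [pairsTup, areasOf, List.filter_append, List.map_append, List.foldl_append]
-- ===== VERDICT (by name: the statement is the Claim_ definition above) =====
theorem part_2_spec : Claim_equal_part_2 := by
  intro data _
  unfold Spec_part_2
  simp only [part_2, part_2_alt, edgesB_eq]
  rw [scanA_eq _ _ (findSquares data) (PySem.List.sorted_pairwise _ _)]
  rw [outerB_eq]
  have hperm : (areasOf (edgesA data).1 (edgesA data).2 (findSquares data)).Perm
      (areasOf (edgesA data).1 (edgesA data).2 (findSquaresRaw data)) :=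
    (((PySem.List.sorted_perm (findSquaresRaw data) (fun x => x.1) false).filter _).map _)
  rw [@List.Perm.foldl_eq _ _ addMin _ _ addMin_rightComm hperm none, findSquaresRaw_eq]
  cases List.foldl addMin none (areasOf (edgesA data).1 (edgesA data).2 (pairsTup data)) <;> rfl
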